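-- pv_equiv track=rewrite | github.com/Shehab611/Digital-Signal-Processing | all_project.py | get_window_type
-- ===== SOURCE A (Python) =====
-- def get_window_type(stop_band):
--     bands_to_windows = {
--         21: 'rectangular',
--         44: 'hanning',
--         53: 'hamming',
--         74: 'blackman'
--     }
--     for band, window_name in sorted(bands_to_windows.items()):
--         if band >= stop_band:
--             return window_name
-- ===== SOURCE B (Python) =====
-- import bisect
--
-- _THRESHOLDS = [21, 44, 53, 74]
-- _NAMES = ['rectangular', 'hanning', 'hamming', 'blackman']
--
--
-- def get_window_type(stop_band):
--     i = bisect.bisect_left(_THRESHOLDS, stop_band)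
--     if i < len(_NAMES):
--         return _NAMES[i]
--     return None
-- ===== Notes on version B (the rewrite author's own statement) =====
-- stated objective: idiomatic
-- what changed: Replaces the linear scan over a sorted dict's items with a bisect_left binary search over a fixed thresholds list indexing a parallel names list.
import Mathlib
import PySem

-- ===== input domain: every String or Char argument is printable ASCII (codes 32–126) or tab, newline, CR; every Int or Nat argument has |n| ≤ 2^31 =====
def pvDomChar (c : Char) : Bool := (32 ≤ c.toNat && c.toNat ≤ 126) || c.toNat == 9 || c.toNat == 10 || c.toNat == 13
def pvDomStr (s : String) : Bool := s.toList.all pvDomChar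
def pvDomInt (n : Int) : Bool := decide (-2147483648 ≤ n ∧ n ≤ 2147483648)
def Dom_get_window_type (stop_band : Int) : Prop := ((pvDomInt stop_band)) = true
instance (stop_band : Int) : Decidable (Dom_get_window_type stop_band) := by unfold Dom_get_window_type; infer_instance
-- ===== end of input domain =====

-- B replaces A's linear scan over the sorted dict items with a bisect_left binary search
-- over a thresholds list indexing a parallel names list (idiomatic; same result everywhere).

-- ===== PORT A =====
-- first (band, name) pair with band >= stop_band, scanning in sorted order; none if the loop falls through
def pvScanA (stop_band : Int) : List (Int × String) → Option String
  | [] => none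
  | (band, window_name) :: rest =>
      if band ≥ stop_band then some window_name else pvScanA stop_band rest

def get_window_type (stop_band : Int) : Option String :=
  pvScanA stop_band [(21, "rectangular"), (44, "hanning"), (53, "hamming"), (74, "blackman")]

-- ===== PORT B =====
def pvThresholds : List Int := [21, 44, 53, 74]
def pvNames : List String := ["rectangular", "hanning", "hamming", "blackman"]

def get_window_type_alt (stop_band : Int) : Option String :=
  let i := PySem.List.bisectLeft pvThresholds stop_band
  if i < pvNames.length then some (pvNames.getD i "") else none

-- ===== PRECONDITION & SPEC =====
def Spec_get_window_type (stop_band : Int) (out : Option String) : Prop := out = get_window_type_alt stop_band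
instance (stop_band : Int) (out : Option String) : Decidable (Spec_get_window_type stop_band out) := by unfold Spec_get_window_type; infer_instance

-- ===== CLAIM (what is proved, stated in full; the proofs are below) =====
def Claim_equal_get_window_type : Prop := ∀ (stop_band : Int), Dom_get_window_type stop_band → Spec_get_window_type stop_band (get_window_type stop_band)

-- ===== LEMMAS AND PROOFS =====
theorem gwt_eq (x : Int) : get_window_type x = get_window_type_alt x := by
  by_cases c1 : 21 < x <;> by_cases c2 : 44 < x <;> by_cases c3 : 53 < x <;> by_cases c4 : 74 < x <;>
    (try (exfalso; omega)) <;>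
    simp [get_window_type, get_window_type_alt, pvScanA, pvThresholds, pvNames,
      PySem.List.bisectLeft, PySem.List.bisectLeftLoop, c1, c2, c3, c4] <;>
    split_ifs <;> first | rfl | omega

-- ===== VERDICT (by name: the statement is the Claim_ definition above) =====
theorem get_window_type_spec : Claim_equal_get_window_type := by
  intro x _
  unfold Spec_get_window_type
  exact gwt_eq x
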